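-- pv_equiv track=rewrite | github.com/digitdustin/AdventOfCode2020 | solutions/Infi2020p1.py | octagon
-- ===== SOURCE A (Python) =====
-- def octagon(sides):
--     sum = 0
--     for i in range(sides):
--         sum += (sides * 3)
--     j = sides
--     while j != (sides * 3):
--         sum += 2 * j
--         j = j + 2
--     return sum
-- ===== SOURCE B (Python) =====
-- def octagon(sides):
--     # closed form: 3*sides^2 from the for-loop, plus sum_{k=0}^{sides-1} 2*(sides+2k) = 4*sides^2 - 2*sides
--     return 7 * sides * sides - 2 * sides
-- ===== Notes on version B (the rewrite author's own statement) =====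
-- stated objective: faster
-- what changed: replaced the for-loop and the step-2 while-loop by the closed-form 7*sides^2 - 2*sides
import Mathlib
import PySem

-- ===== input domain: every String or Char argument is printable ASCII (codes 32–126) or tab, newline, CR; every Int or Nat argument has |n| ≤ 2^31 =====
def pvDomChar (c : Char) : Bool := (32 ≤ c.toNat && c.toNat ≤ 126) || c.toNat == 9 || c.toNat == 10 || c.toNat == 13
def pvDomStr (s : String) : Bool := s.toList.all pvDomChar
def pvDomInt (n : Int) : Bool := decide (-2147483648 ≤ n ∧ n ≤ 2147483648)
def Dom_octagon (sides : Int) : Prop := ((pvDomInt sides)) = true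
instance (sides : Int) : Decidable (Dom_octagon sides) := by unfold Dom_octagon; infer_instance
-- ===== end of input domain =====

-- B replaces A's for-loop and step-2 while-loop by the closed form 7*sides^2 - 2*sides (O(1) vs O(sides));
-- Pre_ excludes sides < 0, where A's while-loop never terminates.


-- ===== PORT A =====
-- the while loop: j stepping by 2 until j = 3*sides; the `j < 3*sides` test only makes the
-- recursion total (within Pre_ it is exactly Python's loop, which runs while j ≠ 3*sides)
def octagonWhile (sides sum j : Int) : Int :=
  if j = sides * 3 then sum
  else if h : j < sides * 3 then octagonWhile sides (sum + 2 * j) (j + 2)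
  else sum
termination_by (sides * 3 - j).toNat
decreasing_by omega

def octagon (sides : Int) : Int :=
  let sum := (List.range sides.toNat).foldl (fun acc _ => acc + sides * 3) 0
  octagonWhile sides sum sides

-- ===== PORT B =====
def octagon_alt (sides : Int) : Int := 7 * sides * sides - 2 * sides

-- ===== PRECONDITION & SPEC =====
-- Pre_ excludes sides < 0, on which A's while-loop diverges (never returns).
def Pre_octagon (sides : Int) : Prop := 0 ≤ sides
instance (sides : Int) : Decidable (Pre_octagon sides) := by unfold Pre_octagon; infer_instance
def pvWitness_octagon : Int := 5

def Spec_octagon (sides : Int) (out : Int) : Prop := out = octagon_alt sides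
instance (sides : Int) (out : Int) : Decidable (Spec_octagon sides out) := by unfold Spec_octagon; infer_instance

-- ===== CLAIM (what is proved, stated in full; the proofs are below) =====
def Claim_equal_octagon : Prop := ∀ (sides : Int), Dom_octagon sides → Pre_octagon sides → Spec_octagon sides (octagon sides)

-- ===== LEMMAS AND PROOFS =====
theorem foldl_const_add (c : Int) (l : List Nat) (init : Int) :
    l.foldl (fun acc _ => acc + c) init = init + l.length * c := by
  induction l generalizing init with
  | nil => simp
  | cons x xs ih => simp [List.foldl, ih]; ring

-- n remaining iterations of the while loop, counting down from j = 3*sides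
theorem octagonWhile_eval (s : Int) (n : Nat) :
    ∀ sum : Int, octagonWhile s sum (s * 3 - 2 * n) = sum + 6 * n * s - 2 * n ^ 2 - 2 * n := by
  induction n with
  | zero => intro sum; rw [octagonWhile]; simp
  | succ k ih =>
    intro sum
    rw [octagonWhile]
    have h1 : ¬ (s * 3 - 2 * (↑k + 1 : Int) = s * 3) := by omega
    have h2 : s * 3 - 2 * (↑k + 1 : Int) < s * 3 := by omega
    push_cast
    push_cast at h1 h2 ih
    rw [if_neg h1, dif_pos h2]
    have : s * 3 - 2 * ((k : Int) + 1) + 2 = s * 3 - 2 * k := by ring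
    rw [this, ih]
    ring

-- ===== VERDICT (by name: the statement is the Claim_ definition above) =====
theorem octagon_spec : Claim_equal_octagon := by
  intro sides _ hpre
  unfold Spec_octagon octagon octagon_alt
  rw [foldl_const_add]
  simp only [List.length_range]
  have hs : ((sides.toNat : Int)) = sides := Int.toNat_of_nonneg hpre
  have hj : sides = sides * 3 - 2 * (sides.toNat : Int) := by omega
  rw [hs]
  rw [show octagonWhile sides (0 + sides * (sides * 3)) sides
        = octagonWhile sides (0 + sides * (sides * 3)) (sides * 3 - 2 * (sides.toNat : Int)) from by rw [← hj]]
  rw [octagonWhile_eval]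
  rw [hs]
  ring
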